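-- pv_equiv track=rewrite | github.com/0marCherif/synthdata1 | evaluation.py | equal_distribution
-- ===== SOURCE A (Python) =====
-- def equal_distribution(data, labels, amount):
--     """
--     Create a balanced dataset with equal distribution of labels.
--
--     Args:
--         data: List of text data
--         labels: List of corresponding labels
--         amount: Number of samples per label
--
--     Returns:
--         Dictionary with balanced data per label
--     """
--     new_dataset = {}
--     label_counter = {}
--
--     for label in labels:
--         label_counter[label] = 0
--         new_dataset[label] = []
--
--     for label, text in zip(labels, data):
--         if label_counter[label] < amount:
--             new_dataset[label].append(text)
--             label_counter[label] += 1
--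
--     return new_dataset
-- ===== SOURCE B (Python) =====
-- def equal_distribution(data, labels, amount):
--     """Balanced dataset: for each distinct label (first-occurrence order),
--     scan the whole (label, text) stream collecting that label's texts,
--     then keep the first max(amount, 0) of them."""
--     n = max(amount, 0)
--     return {label: [t for l, t in zip(labels, data) if l == label][:n]
--             for label in dict.fromkeys(labels)}
-- ===== Notes on version B (the rewrite author's own statement) =====
-- stated objective: alternative
-- what changed: Replaces A's single pass with per-label counters by per-label staged passes: for each distinct label in first-occurrence order, scan the zipped stream to collect that label's texts, then truncate to the first max(amount,0); correct because A's output order is the labels' first-occurrence order and each list is the first `amount` texts of that label.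
import Mathlib
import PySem

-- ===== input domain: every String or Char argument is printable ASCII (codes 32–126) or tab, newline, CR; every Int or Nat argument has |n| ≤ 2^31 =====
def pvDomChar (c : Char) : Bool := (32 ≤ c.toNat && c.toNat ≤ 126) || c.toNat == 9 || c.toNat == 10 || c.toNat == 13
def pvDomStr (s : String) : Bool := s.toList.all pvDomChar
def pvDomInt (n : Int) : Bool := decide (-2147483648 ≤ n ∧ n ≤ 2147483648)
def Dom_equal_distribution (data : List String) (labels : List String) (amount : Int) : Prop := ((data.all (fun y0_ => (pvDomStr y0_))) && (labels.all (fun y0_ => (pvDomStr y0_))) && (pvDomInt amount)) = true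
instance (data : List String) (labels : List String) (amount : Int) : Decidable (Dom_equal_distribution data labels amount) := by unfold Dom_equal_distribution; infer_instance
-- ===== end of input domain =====

-- B replaces A's single counter-guarded pass by per-distinct-label passes: for each label in
-- first-occurrence order it filters the zipped stream and truncates to max(amount,0) — same value.


-- ===== PORT A =====
-- for label in labels: label_counter[label] = 0; new_dataset[label] = []
-- for label, text in zip(labels, data): if label_counter[label] < amount: append; counter += 1
def equal_distribution (data : List String) (labels : List String) (amount : Int) : List (String × List String) :=
  let init : PySem.Dict String (List String) × PySem.Dict String Int :=
    labels.foldl (fun st label => (st.1.insert label [], st.2.insert label 0))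
      (PySem.Dict.empty, PySem.Dict.empty)
  let final : PySem.Dict String (List String) × PySem.Dict String Int :=
    (labels.zip data).foldl
      (fun st p =>
        if st.2.getD p.1 0 < amount then
          (st.1.modify p.1 [] (· ++ [p.2]), st.2.modify p.1 0 (· + 1))
        else st)
      init
  final.1.items

-- ===== PORT B =====
-- n = max(amount, 0)
-- {label: [t for l, t in zip(labels, data) if l == label][:n] for label in dict.fromkeys(labels)}
def equal_distribution_alt (data : List String) (labels : List String) (amount : Int) : List (String × List String) :=
  let n : Int := max amount 0
  (PySem.List.dedup labels).map (fun label =>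
    (label,
      PySem.List.slice
        (((labels.zip data).filter (fun p => p.1 == label)).map Prod.snd)
        none (some n)))

-- ===== PRECONDITION & SPEC =====
def Spec_equal_distribution (data : List String) (labels : List String) (amount : Int) (out : List (String × List String)) : Prop := out = equal_distribution_alt data labels amount
instance (data : List String) (labels : List String) (amount : Int) (out : List (String × List String)) : Decidable (Spec_equal_distribution data labels amount out) := by unfold Spec_equal_distribution; infer_instance

-- ===== CLAIM (what is proved, stated in full; the proofs are below) =====
def Claim_equal_equal_distribution : Prop := ∀ (data : List String) (labels : List String) (amount : Int), Dom_equal_distribution data labels amount → Spec_equal_distribution data labels amount (equal_distribution data labels amount)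

-- ===== LEMMAS AND PROOFS =====

-- a fold inserting the same constant value leaves every getD (at that default) at the default
theorem getD_foldl_insert_const {ν : Type} (labels : List String) (d : PySem.Dict String ν)
    (c : ν) (k : String) (h : d.getD k c = c) :
    (labels.foldl (fun d l => d.insert l c) d).getD k c = c := by
  induction labels generalizing d with
  | nil => simpa using h
  | cons l ls ih =>
    simp only [List.foldl_cons]
    exact ih _ (by rw [PySem.Dict.getD_insert]; split <;> simp [h])

-- the "append every text under its label" fold, pointwise: initial ++ the filtered texts
theorem getD_foldl_modify_append (pairs : List (String × String))
    (g : PySem.Dict String (List String)) (k : String) :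
    (pairs.foldl (fun d p => d.modify p.1 [] (· ++ [p.2])) g).getD k []
      = g.getD k [] ++ (pairs.filter (fun p => p.1 == k)).map Prod.snd := by
  induction pairs generalizing g with
  | nil => simp
  | cons p rest ih =>
    simp only [List.foldl_cons, List.filter_cons]
    rw [ih]
    by_cases h : p.1 = k
    · simp [h, PySem.Dict.getD_modify_self]
    · simp [h, Ne.symm h, PySem.Dict.getD_modify]

-- the loop invariant: A's dataset is pointwise the take-prefix of the group-all dict g,
-- A's counter holds the lengths, and both dicts keep the same key list
theorem loop_inv (amount : Int) (pairs : List (String × String))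
    (ds : PySem.Dict String (List String)) (cnt : PySem.Dict String Int)
    (g : PySem.Dict String (List String))
    (hmem : ∀ p ∈ pairs, p.1 ∈ g.keys)
    (hkeys : ds.keys = g.keys)
    (hval : ∀ k, ds.getD k [] = (g.getD k []).take amount.toNat)
    (hcnt : ∀ k, cnt.getD k 0 = ((ds.getD k []).length : Int)) :
    (pairs.foldl
      (fun st p =>
        if st.2.getD p.1 0 < amount then
          (st.1.modify p.1 [] (· ++ [p.2]), st.2.modify p.1 0 (· + 1))
        else st)
      (ds, cnt)).1.keys = (pairs.foldl (fun d p => d.modify p.1 [] (· ++ [p.2])) g).keys ∧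
    ∀ k, (pairs.foldl
      (fun st p =>
        if st.2.getD p.1 0 < amount then
          (st.1.modify p.1 [] (· ++ [p.2]), st.2.modify p.1 0 (· + 1))
        else st)
      (ds, cnt)).1.getD k []
      = ((pairs.foldl (fun d p => d.modify p.1 [] (· ++ [p.2])) g).getD k []).take amount.toNat := by
  induction pairs generalizing ds cnt g with
  | nil => exact ⟨hkeys, hval⟩
  | cons p rest ih =>
    obtain ⟨l, t⟩ := p
    have hl : l ∈ g.keys := hmem (l, t) (List.mem_cons_self)
    have hgl : g.contains l = true := (PySem.Dict.contains_iff_mem_keys g l).mpr hl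
    have hdl : ds.contains l = true :=
      (PySem.Dict.contains_iff_mem_keys ds l).mpr (hkeys ▸ hl)
    -- keys are preserved on both sides by this step
    have hkeysg : (g.modify l [] (· ++ [t])).keys = g.keys := by
      rw [PySem.Dict.keys_modify, PySem.Dict.keys_insert_of_contains _ _ hgl]
    have hkeysd : (ds.modify l [] (· ++ [t])).keys = ds.keys := by
      rw [PySem.Dict.keys_modify, PySem.Dict.keys_insert_of_contains _ _ hdl]
    have hmem' : ∀ q ∈ rest, q.1 ∈ (g.modify l [] (· ++ [t])).keys := by
      intro q hq; rw [hkeysg]; exact hmem q (List.mem_cons_of_mem _ hq)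
    have hlen : cnt.getD l 0 = ((min (g.getD l []).length amount.toNat : Nat) : Int) := by
      rw [hcnt l, hval l, List.length_take]; norm_cast; omega
    simp only [List.foldl_cons]
    by_cases hcond : cnt.getD l 0 < amount
    · -- A appends and counts; B appends
      have hpos : 0 < amount := by
        by_contra hle
        have : amount.toNat = 0 := by omega
        rw [this] at hlen; simp at hlen; omega
      have hlt : (g.getD l []).length < amount.toNat := by
        by_contra hge
        have : min (g.getD l []).length amount.toNat = amount.toNat := by omega
        rw [this] at hlen; omega
      simp only [hcond, if_pos]
      refine ih (ds.modify l [] (· ++ [t])) (cnt.modify l 0 (· + 1))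
        (g.modify l [] (· ++ [t])) hmem' (by rw [hkeysd, hkeysg, hkeys]) ?_ ?_
      · intro k
        rw [PySem.Dict.getD_modify, PySem.Dict.getD_modify]
        split
        · rw [hval l, List.take_of_length_le (by omega),
            List.take_of_length_le (by simp; omega)]
        · exact hval k
      · intro k
        rw [PySem.Dict.getD_modify, PySem.Dict.getD_modify]
        split
        · rw [hcnt l]; simp
        · exact hcnt k
    · -- A skips; B's append falls beyond the take-prefix
      have htake : (g.getD l []).take amount.toNat
          = ((g.getD l []) ++ [t]).take amount.toNat := by
        by_cases hle : amount ≤ 0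
        · have h0 : amount.toNat = 0 := by omega
          simp [h0]
        · have hpos : 0 < amount := by omega
          have hge : amount.toNat ≤ (g.getD l []).length := by
            by_contra hlt
            have : min (g.getD l []).length amount.toNat = (g.getD l []).length := by omega
            rw [this] at hlen
            have : (g.getD l []).length < amount.toNat := by omega
            omega
          rw [List.take_append_of_le_length hge]
      simp only [hcond, if_false]
      refine ih ds cnt (g.modify l [] (· ++ [t])) hmem' (by rw [hkeysg, hkeys]) ?_ hcnt
      intro k
      rw [PySem.Dict.getD_modify]
      split
      next h => rw [h, hval l]; exact htake
      next => exact hval k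

theorem equal_distribution_eq (data labels : List String) (amount : Int) :
    equal_distribution data labels amount = equal_distribution_alt data labels amount := by
  unfold equal_distribution equal_distribution_alt
  dsimp only
  rw [PySem.List.foldl_prod_mk
      (f := fun d (label : String) => PySem.Dict.insert d label ([] : List String))
      (g := fun d (label : String) => PySem.Dict.insert d label (0 : Int))]
  set ds0 : PySem.Dict String (List String) :=
    labels.foldl (fun d l => d.insert l []) PySem.Dict.empty with hds0
  set cnt0 : PySem.Dict String Int :=
    labels.foldl (fun d l => d.insert l 0) PySem.Dict.empty with hcnt0
  have hkeys0 : ds0.keys = PySem.Set.ofList labels := by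
    rw [hds0, PySem.Dict.keys_foldl_insert, PySem.Dict.keys_empty, PySem.Set.update_nil_left]
  have hnodup0 : ds0.keys.Nodup := by rw [hkeys0]; exact PySem.Set.nodup_ofList labels
  have hds0val : ∀ k, ds0.getD k [] = [] := by
    intro k
    rw [hds0, getD_foldl_insert_const labels PySem.Dict.empty [] k (PySem.Dict.getD_empty k [])]
  obtain ⟨hkeysF, hvalF⟩ := loop_inv amount (labels.zip data) ds0 cnt0 ds0
    (by intro p hp
        rw [hkeys0]
        exact (PySem.Set.mem_ofList _ _).mpr (List.of_mem_zip hp).1)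
    rfl
    (by intro k; rw [hds0val k]; simp)
    (by intro k
        rw [hds0val k, hcnt0,
          getD_foldl_insert_const labels PySem.Dict.empty 0 k (PySem.Dict.getD_empty k 0)]
        simp)
  set g' : PySem.Dict String (List String) :=
    (labels.zip data).foldl (fun d p => d.modify p.1 [] (· ++ [p.2])) ds0 with hg'
  have hnodupg : g'.keys.Nodup :=
    PySem.Dict.nodup_keys_foldl_modify_key (labels.zip data) Prod.fst []
      (fun _ p v => v ++ [p.2]) ds0 hnodup0
  have hnodupA : (((labels.zip data).foldl
      (fun st p =>
        if st.2.getD p.1 0 < amount then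
          (st.1.modify p.1 [] (· ++ [p.2]), st.2.modify p.1 0 (· + 1))
        else st)
      (ds0, cnt0)).1).keys.Nodup := by rw [hkeysF]; exact hnodupg
  have hkeysg' : g'.keys = PySem.Set.ofList labels := by
    rw [hg', PySem.Dict.keys_foldl_modify_key, hkeys0]
    rw [PySem.Set.update_eq_append_filter]
    have : (PySem.Set.ofList ((labels.zip data).map Prod.fst)).filter
        (fun y => !(PySem.Set.contains (PySem.Set.ofList labels) y)) = [] := by
      rw [List.filter_eq_nil_iff]
      intro x hx
      have hxl : x ∈ labels := by
        obtain ⟨q, hq, rfl⟩ := List.mem_map.mp ((PySem.Set.mem_ofList _ _).mp hx)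
        exact (List.of_mem_zip hq).1
      simp [PySem.Set.mem_ofList, hxl]
    rw [this, List.append_nil]
  rw [PySem.Dict.items_eq_map_keys _ hnodupA [], hkeysF, hkeysg',
      ← PySem.List.dedup_eq_ofList]
  apply List.map_congr_left
  intro k _
  have hfilt : g'.getD k []
      = ((labels.zip data).filter (fun p => p.1 == k)).map Prod.snd := by
    rw [hg', getD_foldl_modify_append, hds0val k, List.nil_append]
  have hslice : PySem.List.slice (g'.getD k []) none (some (max amount 0))
      = (g'.getD k []).take amount.toNat := by
    rw [PySem.List.slice_to _ (le_max_right amount 0)]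
    congr 1
    omega
  rw [hvalF k, ← hslice, hfilt]

-- ===== VERDICT (by name: the statement is the Claim_ definition above) =====
theorem equal_distribution_spec : Claim_equal_equal_distribution := by
  intro data labels amount _
  unfold Spec_equal_distribution
  exact equal_distribution_eq data labels amount
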